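-- pv_equiv track=rewrite | github.com/contatomadameka-maker/alpha-dolar-template-2 | backend/strategies/alpha_bot_4_digit.py | _find_best_barrier
-- ===== SOURCE A (Python) =====
-- def _find_best_barrier(frequency):
--     """
--     Varre barreiras 1-8 e escolhe a que tem maior vantagem.
--     Retorna (barrier, direction, confidence).
--     """
--     best = None
--     for barrier in range(1, 9):
--         prob_over  = sum(frequency.get(d, 0) for d in range(barrier + 1, 10))
--         prob_under = sum(frequency.get(d, 0) for d in range(0, barrier))
--
--         if prob_over >= prob_under:
--             direction, confidence = "OVER", prob_over
--         else:
--             direction, confidence = "UNDER", prob_under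
--
--         if best is None or confidence > best[2]:
--             best = (barrier, direction, confidence)
--
--     return best  # (barrier, direction, confidence)
-- ===== SOURCE B (Python) =====
-- def _find_best_barrier(frequency):
--     """
--     Prefix sums over digits 0..9 replace the per-barrier inner scans;
--     then pick the first candidate with maximal confidence.
--     """
--     cum = [0]
--     for d in range(10):
--         cum.append(cum[-1] + frequency.get(d, 0))
--     total = cum[10]
--     candidates = []
--     for barrier in range(1, 9):
--         under = cum[barrier]
--         over = total - cum[barrier + 1]
--         if over >= under:
--             candidates.append((barrier, "OVER", over))
--         else:
--             candidates.append((barrier, "UNDER", under))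
--     best = candidates[0]
--     for c in candidates[1:]:
--         if c[2] > best[2]:
--             best = c
--     return best
-- ===== Notes on version B (the rewrite author's own statement) =====
-- stated objective: alternative
-- what changed: Replaces the two per-barrier inner sum-scans with one prefix-sum array over digits 0..9 (prob_under = cum[b], prob_over = total - cum[b+1]), builds all candidates once and selects the first maximum in a separate pass.
import Mathlib
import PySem

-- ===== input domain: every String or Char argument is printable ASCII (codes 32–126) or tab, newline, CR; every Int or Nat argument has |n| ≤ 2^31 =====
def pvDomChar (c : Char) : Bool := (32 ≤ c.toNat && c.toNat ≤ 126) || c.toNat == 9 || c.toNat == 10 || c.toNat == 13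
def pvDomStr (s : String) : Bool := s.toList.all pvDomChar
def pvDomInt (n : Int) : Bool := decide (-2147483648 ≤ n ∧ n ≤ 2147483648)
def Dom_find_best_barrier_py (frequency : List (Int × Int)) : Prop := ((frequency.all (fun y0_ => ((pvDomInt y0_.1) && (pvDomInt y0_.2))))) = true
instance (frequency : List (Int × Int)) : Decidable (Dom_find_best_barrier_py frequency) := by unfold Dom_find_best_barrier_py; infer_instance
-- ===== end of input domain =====

-- B replaces A's per-barrier inner sum-scans by one prefix-sum pass over digits 0..9
-- and selects the best candidate in a separate pass; return values are proved equal
-- on all inputs (objective: alternative decomposition, same measured cost).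

-- ===== PORT A =====
-- sum(frequency.get(d, 0) for d in range(a, b))
def pvSumDigits (frequency : List (Int × Int)) (a b : Int) : Int :=
  (PySem.List.pyRange a b 1).foldl (fun acc d => acc + PySem.Dict.getD (PySem.Dict.mk frequency) d 0) 0

-- one iteration of A's 'for barrier in range(1, 9)' loop, state = best
def pvStepA (frequency : List (Int × Int)) (best : Option (Int × String × Int))
    (barrier : Int) : Option (Int × String × Int) :=
  let prob_over := pvSumDigits frequency (barrier + 1) 10
  let prob_under := pvSumDigits frequency 0 barrier
  let dc : String × Int :=
    if prob_over ≥ prob_under then ("OVER", prob_over) else ("UNDER", prob_under)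
  match best with
  | none => some (barrier, dc.1, dc.2)
  | some m => if dc.2 > m.2.2 then some (barrier, dc.1, dc.2) else some m

def find_best_barrier_py (frequency : List (Int × Int)) : Int × String × Int :=
  -- range(1,9) is nonempty, so best is always some tuple; the default is unreachable
  ((PySem.List.pyRange 1 9 1).foldl (pvStepA frequency) none).getD (0, "", 0)

-- ===== PORT B =====
-- cum = [0]; for d in range(10): cum.append(cum[-1] + frequency.get(d, 0))
def pvCum (frequency : List (Int × Int)) : List Int :=
  (PySem.List.pyRange 0 10 1).foldl
    (fun cum d => cum ++ [(PySem.List.pyGet? cum (-1)).getD 0 + PySem.Dict.getD (PySem.Dict.mk frequency) d 0])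
    [0]
-- (cum is never empty, so cum[-1] never raises; .getD 0 is the unreachable none branch)

-- candidate for one barrier: under = cum[b], over = total - cum[b+1]
def pvCandB (cum : List Int) (total b : Int) : Int × String × Int :=
  let prob_under := (PySem.List.pyGet? cum b).getD 0
  let prob_over := total - (PySem.List.pyGet? cum (b + 1)).getD 0
  if prob_over ≥ prob_under then (b, "OVER", prob_over) else (b, "UNDER", prob_under)

def find_best_barrier_py_alt (frequency : List (Int × Int)) : Int × String × Int :=
  -- candidates built by append over range(1,9); then a first-max selection pass
  match (PySem.List.pyRange 1 9 1).foldl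
      (fun cs b => cs ++ [pvCandB (pvCum frequency)
        ((PySem.List.pyGet? (pvCum frequency) 10).getD 0) b]) [] with
  | [] => (0, "", 0)   -- unreachable: range(1,9) is nonempty
  | c :: rest => rest.foldl (fun best x => if x.2.2 > best.2.2 then x else best) c

-- ===== PRECONDITION & SPEC =====
def Spec_find_best_barrier_py (frequency : List (Int × Int)) (out : Int × String × Int) : Prop := out = find_best_barrier_py_alt frequency
instance (frequency : List (Int × Int)) (out : Int × String × Int) : Decidable (Spec_find_best_barrier_py frequency out) := by unfold Spec_find_best_barrier_py; infer_instance

-- ===== CLAIM (what is proved, stated in full; the proofs are below) =====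
def Claim_equal_find_best_barrier_py : Prop := ∀ (frequency : List (Int × Int)), Dom_find_best_barrier_py frequency → Spec_find_best_barrier_py frequency (find_best_barrier_py frequency)

-- ===== LEMMAS AND PROOFS =====

-- the candidate A computes for one barrier
def pvCandA (frequency : List (Int × Int)) (b : Int) : Int × String × Int :=
  let prob_over := pvSumDigits frequency (b + 1) 10
  let prob_under := pvSumDigits frequency 0 b
  if prob_over ≥ prob_under then (b, "OVER", prob_over) else (b, "UNDER", prob_under)

lemma pvStepA_eq (f : List (Int × Int)) (best : Option (Int × String × Int)) (b : Int) :
    pvStepA f best b =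
      match best with
      | none => some (pvCandA f b)
      | some m => if (pvCandA f b).2.2 > m.2.2 then some (pvCandA f b) else some m := by
  cases best <;> simp only [pvStepA, pvCandA] <;> split_ifs <;> rfl

lemma pvCum_spec (f : List (Int × Int)) :
    pvCum f =
      [0,
       pvSumDigits f 0 1, pvSumDigits f 0 2, pvSumDigits f 0 3, pvSumDigits f 0 4,
       pvSumDigits f 0 5, pvSumDigits f 0 6, pvSumDigits f 0 7, pvSumDigits f 0 8,
       pvSumDigits f 0 9, pvSumDigits f 0 10] := by
  simp [pvCum, pvSumDigits, PySem.List.pyRange, PySem.List.pyGet?, PySem.List.pyIdx?,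
    List.range_succ]

lemma pvCandB_eq (f : List (Int × Int)) (b : Int) (hb : b ∈ PySem.List.pyRange 1 9 1) :
    pvCandB (pvCum f) ((PySem.List.pyGet? (pvCum f) 10).getD 0) b = pvCandA f b := by
  rw [PySem.List.mem_pyRange_one] at hb
  obtain ⟨hb1, hb2⟩ := hb
  interval_cases b <;>
    simp [pvCandB, pvCandA, pvCum_spec, pvSumDigits, PySem.List.pyRange,
      PySem.List.pyGet?, PySem.List.pyIdx?, List.range_succ] <;>
    split_ifs <;> simp_all <;> omega

lemma pvSelFold (c : Int → Int × String × Int) (l : List Int) (m : Int × String × Int) :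
    l.foldl
        (fun best b =>
          match best with
          | none => some (c b)
          | some m => if (c b).2.2 > m.2.2 then some (c b) else some m)
        (some m)
      = some ((l.map c).foldl (fun best x => if x.2.2 > best.2.2 then x else best) m) := by
  induction l generalizing m with
  | nil => rfl
  | cons h t ih => simp only [List.foldl, List.map]; split_ifs <;> exact ih _

-- ===== VERDICT (by name: the statement is the Claim_ definition above) =====
set_option maxHeartbeats 1000000 in
theorem find_best_barrier_py_spec : Claim_equal_find_best_barrier_py := by
  intro f _
  unfold Spec_find_best_barrier_py find_best_barrier_py find_best_barrier_py_alt
  have hcand : (PySem.List.pyRange 1 9 1).foldl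
      (fun cs b => cs ++ [pvCandB (pvCum f) ((PySem.List.pyGet? (pvCum f) 10).getD 0) b]) []
      = (PySem.List.pyRange 1 9 1).map (pvCandA f) := by
    rw [PySem.List.foldl_append_singleton_eq_map]
    simpa using List.map_congr_left (fun b hb => pvCandB_eq f b hb)
  have hstep : (PySem.List.pyRange 1 9 1).foldl (pvStepA f) none
      = (PySem.List.pyRange 1 9 1).foldl
          (fun best b =>
            match best with
            | none => some (pvCandA f b)
            | some m => if (pvCandA f b).2.2 > m.2.2 then some (pvCandA f b) else some m)
          none := by
    exact PySem.List.foldl_congr_mem _ _ _ _ (fun best b _ => pvStepA_eq f best b)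
  have hrange : PySem.List.pyRange 1 9 1 = 1 :: PySem.List.pyRange 2 9 1 := by
    rw [PySem.List.pyRange_one_cons (by norm_num)]; norm_num
  rw [hstep, hcand, hrange]
  simp only [List.foldl, List.map]
  rw [pvSelFold]
  rfl
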